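-- pv_equiv track=rewrite | github.com/Tnovyloo/Matura-Informatyka | Matura 2016/Main1.py | cesar_code_exercise3
-- ===== SOURCE A (Python) =====
-- def cesar_code_exercise3(data):
--     changed_data = []
--     for line in data:
--         boolean = False
--         if len(line.split(' ')) == 1:
--             continue
--         else:
--             word = line.split(' ')[0]
--             word_coded = line.split(' ')[1]
--             for k in range(0, 26): # in range of alphabet
--                 result = ''
--                 for i in word:
--                     result += chr(((ord(i)-65+k)%26)+65)
--                 if result == word_coded:
--                     boolean = True
--             if not boolean:
--                 changed_data.append(word)
--     return changed_data
-- ===== SOURCE B (Python) =====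
-- def cesar_code_exercise3(data):
--     out = []
--     for line in data:
--         tokens = line.split(' ')
--         if len(tokens) == 1:
--             continue
--         word, coded = tokens[0], tokens[1]
--         shifts = {(ord(b) - ord(a)) % 26 for a, b in zip(word, coded)}
--         valid = (len(word) == len(coded)
--                  and all(65 <= ord(b) <= 90 for b in coded)
--                  and len(shifts) <= 1)
--         if not valid:
--             out.append(word)
--     return out
-- ===== Notes on version B (the rewrite author's own statement) =====
-- stated objective: alternative
-- what changed: Instead of generating all 26 Caesar encodings of the word and comparing each to the coded token, B makes a single pass that collects the set of per-position shifts (ord(b)-ord(a))%26 and accepts iff lengths match, every coded char is an uppercase letter, and the shift set has at most one element.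
import Mathlib
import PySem

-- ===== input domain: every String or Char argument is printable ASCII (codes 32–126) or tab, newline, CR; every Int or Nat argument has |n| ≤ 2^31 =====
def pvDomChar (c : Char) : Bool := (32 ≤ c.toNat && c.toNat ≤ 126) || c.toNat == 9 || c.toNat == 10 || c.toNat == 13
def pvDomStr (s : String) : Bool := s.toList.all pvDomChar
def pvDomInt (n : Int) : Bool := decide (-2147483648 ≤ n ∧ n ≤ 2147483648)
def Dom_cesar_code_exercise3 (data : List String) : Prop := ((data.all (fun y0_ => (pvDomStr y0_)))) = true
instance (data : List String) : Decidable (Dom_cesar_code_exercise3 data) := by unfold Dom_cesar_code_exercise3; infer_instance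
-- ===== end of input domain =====

-- B replaces A's 26-encodings-per-line search by one arithmetic pass collecting the set of
-- per-position shifts and testing a closed-form validity invariant (objective: alternative).

-- ===== PORT A =====
-- chr(((ord(i)-65+k)%26)+65); Python's % on positive divisor = Int.emod via PySem.Int.mod
def pvCaesarChar (k : Int) (i : Char) : Char :=
  Char.ofNat ((PySem.Int.mod ((i.toNat : Int) - 65 + k) 26).toNat + 65)

def cesar_code_exercise3 (data : List String) : List String :=
  data.foldl (fun changed_data line =>
    let toks := PySem.Chars.splitOn line.toList [' ']
    if toks.length = 1 then changed_data
    else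
      let word := PySem.List.pyGetD toks 0 []
      let word_coded := PySem.List.pyGetD toks 1 []
      let boolean := (PySem.List.pyRange 0 26).foldl (fun boolean k =>
        let result := word.foldl (fun result i => result ++ [pvCaesarChar k i]) []
        if result = word_coded then true else boolean) false
      if !boolean then changed_data ++ [String.ofList word] else changed_data) []

-- ===== PORT B =====
-- (ord(b) - ord(a)) % 26 for a pair from zip(word, coded)
def pvShift (p : Char × Char) : Int :=
  PySem.Int.mod ((p.2.toNat : Int) - (p.1.toNat : Int)) 26

def cesar_code_exercise3_alt (data : List String) : List String :=
  data.foldl (fun out line =>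
    let toks := PySem.Chars.splitOn line.toList [' ']
    if toks.length = 1 then out
    else
      let word := PySem.List.pyGetD toks 0 []
      let coded := PySem.List.pyGetD toks 1 []
      let shifts : PySem.Set Int := PySem.Set.ofList ((word.zip coded).map pvShift)
      let valid := (word.length == coded.length)
        && coded.all (fun b => decide (65 ≤ b.toNat) && decide (b.toNat ≤ 90))
        && decide ((shifts : List Int).length ≤ 1)
      if !valid then out ++ [String.ofList word] else out) []

-- ===== PRECONDITION & SPEC =====
def Spec_cesar_code_exercise3 (data : List String) (out : List String) : Prop := out = cesar_code_exercise3_alt data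
instance (data : List String) (out : List String) : Decidable (Spec_cesar_code_exercise3 data out) := by unfold Spec_cesar_code_exercise3; infer_instance

-- ===== CLAIM (what is proved, stated in full; the proofs are below) =====
def Claim_equal_cesar_code_exercise3 : Prop := ∀ (data : List String), Dom_cesar_code_exercise3 data → Spec_cesar_code_exercise3 data (cesar_code_exercise3 data)

-- ===== LEMMAS AND PROOFS =====

lemma pv_toNat_ofNat (n : Nat) (h1 : 65 ≤ n) (h2 : n ≤ 90) : (Char.ofNat n).toNat = n := by
  have hv : n.isValidChar := Or.inl (by omega)
  rw [Char.toNat_ofNat]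
  simp [hv]

lemma pv_toNat_caesar (k : Int) (i : Char) :
    ((pvCaesarChar k i).toNat : Int) = ((i.toNat : Int) - 65 + k) % 26 + 65 := by
  unfold pvCaesarChar
  rw [PySem.Int.mod_eq_emod_of_pos (by norm_num)]
  have h0 : (0:Int) ≤ ((i.toNat : Int) - 65 + k) % 26 := Int.emod_nonneg _ (by norm_num)
  have h26 : ((i.toNat : Int) - 65 + k) % 26 < 26 := Int.emod_lt_of_pos _ (by norm_num)
  rw [pv_toNat_ofNat _ (by omega) (by omega)]
  omega

-- set size ≤ 1 ↔ all elements pairwise equal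
lemma pv_set_len_le_one (xs : List Int) :
    ((PySem.Set.ofList xs : List Int).length ≤ 1) ↔ ∀ x ∈ xs, ∀ y ∈ xs, x = y := by
  constructor
  · intro h x hx y hy
    rw [← PySem.Set.mem_ofList] at hx hy
    cases hl : (PySem.Set.ofList xs : List Int) with
    | nil => rw [hl] at hx; simp at hx
    | cons a t =>
        rw [hl] at h hx hy
        have ht : t = [] := by
          cases t with
          | nil => rfl
          | cons b t2 => simp at h
        subst ht
        simp at hx hy
        rw [hx, hy]
  · intro h
    cases hl : (PySem.Set.ofList xs : List Int) with
    | nil => simp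
    | cons a t =>
        cases t with
        | nil => simp
        | cons b t2 =>
            exfalso
            have hnd := PySem.Set.nodup_ofList xs
            rw [hl] at hnd
            have hab : a ≠ b := by
              rcases List.nodup_cons.1 hnd with ⟨hna, _⟩
              intro he; exact hna (he ▸ List.mem_cons_self ..)
            have ha : a ∈ xs := by
              rw [← PySem.Set.mem_ofList, hl]; simp
            have hb : b ∈ xs := by
              rw [← PySem.Set.mem_ofList, hl]; simp
            exact hab (h a ha b hb)

lemma pv_foldl_if_or {α : Type} (p : α → Prop) [DecidablePred p] (l : List α) (b : Bool) :
    l.foldl (fun b k => if p k then true else b) b = (b || l.any (fun k => decide (p k))) := by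
  induction l generalizing b with
  | nil => simp
  | cons x xs ih =>
      rw [List.foldl_cons, ih, List.any_cons]
      by_cases h : p x <;> simp [h]

-- the per-line equivalence: A's 26-fold search equals B's invariant check
lemma pv_line_eq (word coded : List Char) :
    ((PySem.List.pyRange 0 26).foldl (fun boolean k =>
        if word.foldl (fun result i => result ++ [pvCaesarChar k i]) [] = coded then true else boolean) false)
    = ((word.length == coded.length)
        && coded.all (fun b => decide (65 ≤ b.toNat) && decide (b.toNat ≤ 90))
        && decide ((PySem.Set.ofList ((word.zip coded).map pvShift) : List Int).length ≤ 1)) := by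
  have hmap : ∀ k : Int, word.foldl (fun r i => r ++ [pvCaesarChar k i]) ([] : List Char)
      = word.map (pvCaesarChar k) := fun k => by
    simpa using PySem.List.foldl_append_singleton_eq_map (pvCaesarChar k) word []
  simp only [hmap]
  rw [pv_foldl_if_or (fun k => word.map (pvCaesarChar k) = coded)]
  rw [Bool.eq_iff_iff]
  simp only [Bool.false_or, List.any_eq_true, Bool.and_eq_true, decide_eq_true_eq,
    List.all_eq_true, beq_iff_eq]
  constructor
  · rintro ⟨k, hk, hmapk⟩
    rw [PySem.List.mem_pyRange_one] at hk
    subst hmapk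
    refine ⟨⟨(List.length_map ..).symm, ?_⟩, ?_⟩
    · intro b hb
      obtain ⟨a, _, rfl⟩ := List.mem_map.1 hb
      have h1 := pv_toNat_caesar k a
      have h0 : (0:Int) ≤ ((a.toNat : Int) - 65 + k) % 26 := Int.emod_nonneg _ (by norm_num)
      have h26 : ((a.toNat : Int) - 65 + k) % 26 < 26 := Int.emod_lt_of_pos _ (by norm_num)
      omega
    · rw [pv_set_len_le_one]
      have hall : ∀ x ∈ (word.zip (word.map (pvCaesarChar k))).map pvShift, x = k := by
        intro x hx
        obtain ⟨p, hp, rfl⟩ := List.mem_map.1 hx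
        obtain ⟨j, hj, rfl⟩ := List.mem_iff_getElem.1 hp
        have hjw : j < word.length := by
          have := hj; simp [List.length_zip] at this; omega
        have hjm : j < (word.map (pvCaesarChar k)).length := by simp [hjw]
        rw [List.getElem_zip]
        unfold pvShift
        rw [PySem.Int.mod_eq_emod_of_pos (by norm_num)]
        simp only [List.getElem_map]
        have h1 := pv_toNat_caesar k word[j]
        omega
      intro x hx y hy
      rw [hall x hx, hall y hy]
  · rintro ⟨⟨hlen, hup⟩, hset⟩
    rw [pv_set_len_le_one] at hset
    cases word with
    | nil =>
        refine ⟨0, PySem.List.mem_pyRange_one.2 (by omega), ?_⟩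
        cases coded with
        | nil => rfl
        | cons b c => simp at hlen
    | cons a w =>
        cases coded with
        | nil => simp at hlen
        | cons b c =>
            refine ⟨((b.toNat : Int) - (a.toNat : Int)) % 26,
              PySem.List.mem_pyRange_one.2
                ⟨Int.emod_nonneg _ (by norm_num), Int.emod_lt_of_pos _ (by norm_num)⟩, ?_⟩
            apply List.ext_getElem (by simpa using hlen)
            intro j h1 h2
            simp only [List.getElem_map]
            -- the shift at position j equals the shift at position 0
            have hjw : j < (a :: w).length := by simpa using h1
            have hjz : j < ((a :: w).zip (b :: c)).length := by
              simp [List.length_zip] at hlen hjw ⊢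
              omega
            have h0z : 0 < ((a :: w).zip (b :: c)).length := by
              simp [List.length_zip]
            have hmemj : pvShift ((a :: w).zip (b :: c))[j]
                ∈ ((a :: w).zip (b :: c)).map pvShift :=
              List.mem_map.2 ⟨_, List.getElem_mem hjz, rfl⟩
            have hmem0 : pvShift ((a :: w).zip (b :: c))[0]
                ∈ ((a :: w).zip (b :: c)).map pvShift :=
              List.mem_map.2 ⟨_, List.getElem_mem h0z, rfl⟩
            have hje := hset _ hmemj _ hmem0
            rw [List.getElem_zip] at hje
            have h00 : (((a :: w).zip (b :: c))[0]'h0z) = (a, b) := by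
              simp
            rw [h00] at hje
            unfold pvShift at hje
            rw [PySem.Int.mod_eq_emod_of_pos (by norm_num),
              PySem.Int.mod_eq_emod_of_pos (by norm_num)] at hje
            simp only at hje
            -- coded[j] is an uppercase letter
            have hupj := hup ((b :: c)[j]'h2) (List.getElem_mem h2)
            -- conclude by character arithmetic
            have hC := pv_toNat_caesar (((b.toNat : Int) - (a.toNat : Int)) % 26) ((a :: w)[j]'hjw)
            have htn : ((pvCaesarChar (((b.toNat : Int) - (a.toNat : Int)) % 26) ((a :: w)[j]'hjw)).toNat : Int)
                = (((b :: c)[j]'h2).toNat : Int) := by omega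
            have : (pvCaesarChar (((b.toNat : Int) - (a.toNat : Int)) % 26) ((a :: w)[j]'hjw)).toNat
                = ((b :: c)[j]'h2).toNat := by exact_mod_cast htn
            rw [← Char.ofNat_toNat (pvCaesarChar _ _), this, Char.ofNat_toNat]

-- ===== VERDICT (by name: the statement is the Claim_ definition above) =====
theorem cesar_code_exercise3_spec : Claim_equal_cesar_code_exercise3 := by
  intro data _
  unfold Spec_cesar_code_exercise3 cesar_code_exercise3 cesar_code_exercise3_alt
  simp only [pv_line_eq]
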